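/-
  CHECK FILE (compile-only): HOW stb_vorbis_open_memory ESTABLISHES THE FIELD `cfg` OF `DecodeInv`

      cfg : ∀ B, ConfigOK.Reads mem f B → A.Blk B          ("every block the configuration reads is a setup block of the arena")

  for the arena copy `f`, from start_decoder's post (`StartDecoder.Done.reads_arena`: a THEOREM of the success state `Done`, stated for
  the stack object `p`): over the function's own stores between start_decoder's return and the copy (`readsArena_transfer`), over
  vorbis_alloc (`readsArena_extends`), over the transport `*f = p` (`readsArena_move`) — the three lemmas are at the end of
  Vorbis/Spec/DecodeInv.lean. The result is the hypothesis `hcfg` of the `example` "How stb_vorbis_open_memory establishes the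
  invariant" of Vorbis/Spec/TopIface.lean; from there on (vorbis_pump_first_frame, every decode-time function) the clause is carried
  INSIDE the invariant (`DecodeInv.cfg_transfer` in `frame_stores` / `carry`).

  WHY THE CLAUSE IS A FIELD OF `DecodeInv` AND NOT A SEPARATE CONJUNCT of stb_vorbis_open_memory's post and decode_all's assertions (the
  first ruling, "option C", checked and refuted by this file's first edition): the clause would have to cross vorbis_pump_first_frame
  (called by stb_vorbis_open_memory AFTER the copy, stb_vorbis_fixed.c 5189) and stb_vorbis_get_frame_float (every round of
  decode_all's loop), whose posts relate the memory after the call to the memory before it by NOTHING but "`DecodeInv` again, same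
  ghosts" — no `DecodeSame`, no "the blocks CONFIG reads are kept" — over a footprint that is the WHOLE arena.
-/
import Vorbis.Spec.Top
import Vorbis.Spec.StartDecoderAt

namespace Vorbis.Spec.OpenMemoryReadsTest
open X86 X86.User Asan

/-- **From start_decoder's exit to the state after `*f = p`** in stb_vorbis_open_memory: `mem₁` = start_decoder's exit memory (the
stack object `p`), `mem₂` = after vorbis_alloc (`A₁.1.Extends A₂`; the configuration of `p` over some block predicate `Blk`:
`Top.vorbisOK_frame_alloc`), `mem₃` = after the copy. The clause holds for the arena copy `f`. -/
example {len p f : Nat} {Live : Nat → Prop} {A₁ : Arena × List Obj} {A₂ : Arena} {Blk Blk' : Block → Prop} {mem₁ mem₂ mem₃ : Mem}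
    (hdone : StartDecoder.Done len p Live A₁ mem₁) (hext : A₁.1.Extends A₂)
    (hcfg₁ : ConfigOK (StartDecoder.blk len p A₁) mem₁ p)
    (he₁₂ : ObjEq ConfigOK.wins mem₁ p mem₂ p) (hk₁₂ : ∀ B, ConfigOK.Reads mem₁ p B → B.Kept mem₁ mem₂)
    (hcfg₂ : ConfigOK Blk mem₂ p) (hm : Move Blk Blk' mem₂ mem₃ p f) :
    ∀ B, ConfigOK.Reads mem₃ f B → A₂.Blk B := by
  have h1 : ∀ B, ConfigOK.Reads mem₁ p B → A₁.1.Blk B := fun B hR => hdone.reads_arena hR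
  have h2 : ∀ B, ConfigOK.Reads mem₂ p B → A₁.1.Blk B := readsArena_transfer hcfg₁ he₁₂ hk₁₂ h1
  exact readsArena_move hm hcfg₂ (readsArena_extends hext h2)

/-- `StartDecoder.Done.reads_arena` needs nothing but the existing success state of start_decoder's post (no new clause of the
contract, no new assertion): the configuration of `Done` is `Real.VorbisOK.config hdone.vorbis`. -/
example {len p : Nat} {Live : Nat → Prop} {A : Arena × List Obj} {mem : Mem} (hdone : StartDecoder.Done len p Live A mem) :
    ConfigOK (StartDecoder.blk len p A) mem p ∧ ∀ B, ConfigOK.Reads mem p B → A.1.Blk B :=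
  ⟨Real.VorbisOK.config hdone.vorbis, fun _ hR => hdone.reads_arena hR⟩

end Vorbis.Spec.OpenMemoryReadsTest
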